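-- pv_equiv track=rewrite | github.com/ilgrisha/CornStructor | backend/app/core/primer/constraints.py | consecutive_complement_runs
-- ===== SOURCE A (Python) =====
-- from typing import Tuple
--
-- def consecutive_complement_runs(a: str, b_rc: str) -> Tuple[int, int]:
--     """
--     Compute:
--      - max consecutive complementary matches when a is aligned to RC of b without gaps
--      - total complementary matches in the best ungapped alignment (max over shifts)
--
--     Returns:
--         (max_consecutive, max_total)
--     """
--     a = a.upper()
--     b_rc = b_rc.upper()
--     max_consec = 0
--     max_total = 0
--
--     # Align a against b_rc with all relative shifts (ungapped)
--     for shift in range(-len(b_rc) + 1, len(a)):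
--         consec = 0
--         total = 0
--         for i in range(len(a)):
--             j = i - shift
--             if 0 <= j < len(b_rc):
--                 if a[i] == b_rc[j]:
--                     total += 1
--                     consec += 1
--                     max_consec = max(max_consec, consec)
--                 else:
--                     consec = 0
--         max_total = max(max_total, total)
--
--     return max_consec, max_total
-- ===== SOURCE B (Python) =====
-- def consecutive_complement_runs(a, b_rc):
--     """
--     Dynamic-programming matrix scan: one row-major pass over the n*m cell grid.
--     A run ending at cell (i, j) extends the run ending at (i-1, j-1) (classic
--     longest-common-substring DP row), and per-diagonal match totals are kept in
--     a flat counter array indexed by the diagonal, so no loop over shifts exists.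
--     """
--     A = a.upper()
--     B = b_rc.upper()
--     n, m = len(A), len(B)
--     max_consec = 0
--     max_total = 0
--     counts = [0] * (n + m - 1)       # matches seen so far on each diagonal
--     prev = [0] * (m + 1)             # run lengths ending in the previous row
--     for i in range(n):
--         cur = [0] * (m + 1)
--         for j in range(m):
--             if A[i] == B[j]:
--                 r = prev[j] + 1
--                 cur[j + 1] = r
--                 if r > max_consec:
--                     max_consec = r
--                 d = i + (m - 1 - j)
--                 c = counts[d] + 1
--                 counts[d] = c
--                 if c > max_total:
--                     max_total = c
--         prev = cur
--     return max_consec, max_total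
-- ===== Notes on version B (the rewrite author's own statement) =====
-- stated objective: faster
-- what changed: Replaces A's loop over all shifts with an in-range guard per cell by a single row-major dynamic-programming pass over the n*m grid: runs extend diagonally via a DP row (longest-common-substring style) and per-diagonal match totals live in a flat counter array, so there is no shift loop at all.
import Mathlib
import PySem

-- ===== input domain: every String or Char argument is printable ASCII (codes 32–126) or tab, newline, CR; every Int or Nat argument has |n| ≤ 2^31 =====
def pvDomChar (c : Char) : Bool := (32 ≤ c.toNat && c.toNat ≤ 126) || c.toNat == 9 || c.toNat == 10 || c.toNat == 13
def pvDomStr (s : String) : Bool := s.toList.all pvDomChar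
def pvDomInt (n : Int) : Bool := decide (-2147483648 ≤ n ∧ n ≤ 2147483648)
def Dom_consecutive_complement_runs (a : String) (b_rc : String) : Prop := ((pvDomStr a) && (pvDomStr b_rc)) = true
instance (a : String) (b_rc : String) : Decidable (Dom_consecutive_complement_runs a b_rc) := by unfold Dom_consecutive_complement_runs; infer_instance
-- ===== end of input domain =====

-- B replaces A's loop over all shifts (with an in-range test at every cell) by a
-- single row-major dynamic-programming pass over the n×m cell grid (a DP row of
-- run lengths plus a flat per-diagonal match counter); same return value.

-- ===== PORT A =====
-- per-cell step and per-shift body of A's loops (transliterated from Source A)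
def pvAstep (la lb : List Char) (shift : Int) (t : Int × Int × Int) (i : Int) : Int × Int × Int :=
  let j := i - shift
  if 0 ≤ j ∧ j < (lb.length : Int) then
    if PySem.List.pyGet? la i = PySem.List.pyGet? lb j then
      (t.1 + 1, t.2.1 + 1, max t.2.2 (t.1 + 1))
    else (0, t.2.1, t.2.2)
  else t

def pvAbody (la lb : List Char) (st : Int × Int) (shift : Int) : Int × Int :=
  let inner := (PySem.List.pyRange 0 (la.length : Int) 1).foldl (pvAstep la lb shift) (0, 0, st.1)
  (inner.2.2, max st.2 inner.2.1)

def consecutive_complement_runs (a : String) (b_rc : String) : Int × Int :=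
  let la := (PySem.Str.upper a).toList
  let lb := (PySem.Str.upper b_rc).toList
  (PySem.List.pyRange (-(lb.length : Int) + 1) (la.length : Int) 1).foldl (pvAbody la lb) (0, 0)

-- ===== PORT B =====
-- transliteration of Source B: one cell of the DP pass, one row, the row-major loop
def pvBcell (la lb : List Char) (prev : List Int) (i : Nat)
    (t : Int × Int × List Int × List Int) (j : Nat) : Int × Int × List Int × List Int :=
  if la.getD i ' ' = lb.getD j ' ' then
    let r := prev.getD j 0 + 1
    let cur' := t.2.2.2.set (j + 1) r
    let mc := if r > t.1 then r else t.1
    let d := i + (lb.length - 1 - j)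
    let c := t.2.2.1.getD d 0 + 1
    let counts' := t.2.2.1.set d c
    let mt := if c > t.2.1 then c else t.2.1
    (mc, mt, counts', cur')
  else t

def pvBrow (la lb : List Char) (st : Int × Int × List Int × List Int) (i : Nat) :
    Int × Int × List Int × List Int :=
  (List.range lb.length).foldl (pvBcell la lb st.2.2.2 i)
    (st.1, st.2.1, st.2.2.1, List.replicate (lb.length + 1) 0)

def consecutive_complement_runs_alt (a : String) (b_rc : String) : Int × Int :=
  let la := (PySem.Str.upper a).toList
  let lb := (PySem.Str.upper b_rc).toList
  let fin := (List.range la.length).foldl (pvBrow la lb)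
    (0, 0, List.replicate (la.length + lb.length - 1) 0, List.replicate (lb.length + 1) 0)
  (fin.1, fin.2.1)

-- ===== PRECONDITION & SPEC =====
def Spec_consecutive_complement_runs (a : String) (b_rc : String) (out : Int × Int) : Prop := out = consecutive_complement_runs_alt a b_rc
instance (a : String) (b_rc : String) (out : Int × Int) : Decidable (Spec_consecutive_complement_runs a b_rc out) := by unfold Spec_consecutive_complement_runs; infer_instance

-- ===== CLAIM (what is proved, stated in full; the proofs are below) =====
def Claim_equal_consecutive_complement_runs : Prop := ∀ (a : String) (b_rc : String), Dom_consecutive_complement_runs a b_rc → Spec_consecutive_complement_runs a b_rc (consecutive_complement_runs a b_rc)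

-- ===== LEMMAS AND PROOFS =====

-- running-maximum-of-a-projection fold, and its toolkit
def pvLMax {α : Type} (l : List α) (f : α → Int) : Int :=
  l.foldl (fun acc x => max acc (f x)) 0

lemma pvLMax_init {α : Type} (l : List α) (f : α → Int) (a : Int) (ha : 0 ≤ a) :
    l.foldl (fun acc x => max acc (f x)) a = max a (pvLMax l f) := by
  induction l generalizing a with
  | nil => simp only [List.foldl_nil, pvLMax]; omega
  | cons x l ih =>
      have h1 := ih (max a (f x)) (by omega)
      have h2 := ih (max 0 (f x)) (by omega)
      simp only [pvLMax, List.foldl_cons] at *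
      rw [h1, h2]
      omega

lemma pvLMax_nonneg {α : Type} (l : List α) (f : α → Int) : 0 ≤ pvLMax l f := by
  induction l with
  | nil => simp [pvLMax]
  | cons x l ih =>
      have := pvLMax_init l f (max 0 (f x)) (by omega)
      simp only [pvLMax, List.foldl_cons] at *
      omega

lemma pvLMax_cons {α : Type} (x : α) (l : List α) (f : α → Int) :
    pvLMax (x :: l) f = max (f x) (pvLMax l f) := by
  have h := pvLMax_init l f (max 0 (f x)) (by omega)
  have h0 := pvLMax_nonneg l f
  simp only [pvLMax, List.foldl_cons] at *
  omega

lemma le_pvLMax {α : Type} {x : α} {l : List α} (f : α → Int) (h : x ∈ l) :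
    f x ≤ pvLMax l f := by
  induction l with
  | nil => cases h
  | cons y l ih =>
      rw [pvLMax_cons]
      rcases List.mem_cons.1 h with h' | h'
      · subst h'; omega
      · have := ih h'; omega

lemma pvLMax_le {α : Type} {l : List α} {f : α → Int} {c : Int} (hc : 0 ≤ c)
    (h : ∀ x ∈ l, f x ≤ c) : pvLMax l f ≤ c := by
  induction l with
  | nil => simpa [pvLMax] using hc
  | cons y l ih =>
      rw [pvLMax_cons]
      have h1 := h y (List.mem_cons_self ..)
      have h2 := ih (fun x hx => h x (List.mem_cons_of_mem _ hx))
      omega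

lemma pvLMax_congr {α : Type} {l : List α} {f g : α → Int}
    (h : ∀ x ∈ l, f x = g x) : pvLMax l f = pvLMax l g := by
  induction l with
  | nil => rfl
  | cons y l ih =>
      rw [pvLMax_cons, pvLMax_cons, h y (List.mem_cons_self ..),
        ih (fun x hx => h x (List.mem_cons_of_mem _ hx))]

lemma pvLMax_zero {α : Type} (l : List α) : pvLMax l (fun _ => (0 : Int)) = 0 :=
  le_antisymm (pvLMax_le le_rfl (fun _ _ => le_rfl)) (pvLMax_nonneg _ _)

lemma pvLMax_nil {α : Type} (f : α → Int) : pvLMax ([] : List α) f = 0 := rfl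

lemma pvLMax_snoc {α : Type} (l : List α) (x : α) (f : α → Int) :
    pvLMax (l ++ [x]) f = max (pvLMax l f) (f x) := by
  simp [pvLMax, List.foldl_append]

lemma pvLMax_range_succ (k : Nat) (f : Nat → Int) :
    pvLMax (List.range (k + 1)) f = max (pvLMax (List.range k) f) (f k) := by
  rw [List.range_succ, pvLMax_snoc]

lemma pvLMax_map {α β : Type} (g : α → β) (l : List α) (f : β → Int) :
    pvLMax (l.map g) f = pvLMax l (fun x => f (g x)) := by
  simp [pvLMax, List.foldl_map]

lemma pvLMax_range_shift (k : Nat) (f : Nat → Int) :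
    pvLMax (List.range (k + 1)) f = max (f 0) (pvLMax (List.range k) (fun t => f (t + 1))) := by
  rw [List.range_succ_eq_map, pvLMax_cons, pvLMax_map]

lemma pvCountP_range_shift (k : Nat) (p : Nat → Bool) :
    (List.range (k + 1)).countP p
      = (if p 0 then 1 else 0) + (List.range k).countP (fun t => p (t + 1)) := by
  rw [List.range_succ_eq_map, List.countP_cons, List.countP_map]
  have : (p ∘ Nat.succ) = fun t => p (t + 1) := rfl
  rw [this]
  omega

-- A's per-shift scan, rewritten per diagonal (proof-side helpers)
def pvDstep (t : Int × Int × Int) (p : Char × Char) : Int × Int × Int :=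
  if p.1 = p.2 then
    let run := t.2.1 + 1
    (if run > t.1 then run else t.1, run, t.2.2 + 1)
  else (t.1, 0, t.2.2)

def pvDiag (la lb : List Char) (st : Int × Int) (shift : Int) : Int × Int :=
  let i := if shift > 0 then shift else 0
  let j := i - shift
  let w := ((PySem.List.slice la (some i) none).zip (PySem.List.slice lb (some j) none)).foldl
      pvDstep (0, 0, 0)
  (max st.1 w.1, max st.2 w.2.2)

lemma pv_foldl_const {α β : Type} (l : List β) (st : α) :
    l.foldl (fun s _ => s) st = st := by
  induction l generalizing st with
  | nil => rfl
  | cons x l ih => exact ih st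

-- separating the incoming best/total accumulators from a diagonal walk
lemma pv_sep (l : List (Char × Char)) :
    ∀ (b r t : Int), 0 ≤ b → 0 ≤ r →
      l.foldl pvDstep (b, r, t) =
        (max b (l.foldl pvDstep (0, r, 0)).1,
         (l.foldl pvDstep (0, r, 0)).2.1,
         t + (l.foldl pvDstep (0, r, 0)).2.2) := by
  induction l with
  | nil =>
      intro b r t hb hr
      simp only [List.foldl_nil, Prod.mk.injEq]
      refine ⟨by omega, by trivial, by omega⟩
  | cons p l ih =>
      intro b r t hb hr
      by_cases hp : p.1 = p.2
      · have h1 : pvDstep (b, r, t) p = (max b (r + 1), r + 1, t + 1) := by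
          simp only [pvDstep, if_pos hp]
          refine Prod.ext ?_ rfl
          simp; omega
        have h2 : pvDstep (0, r, 0) p = (r + 1, r + 1, 1) := by
          simp only [pvDstep, if_pos hp]
          refine Prod.ext ?_ rfl
          simp; omega
        rw [List.foldl_cons, List.foldl_cons, h1, h2,
            ih (max b (r + 1)) (r + 1) (t + 1) (by omega) (by omega),
            ih (r + 1) (r + 1) 1 (by omega) (by omega)]
        refine Prod.ext ?_ (Prod.ext rfl ?_)
        · show max (max b (r + 1)) _ = max b _
          omega
        · show (t + 1) + _ = t + (1 + _)
          omega
      · have h1 : pvDstep (b, r, t) p = (b, 0, t) := by simp [pvDstep, hp]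
        have h2 : pvDstep (0, r, 0) p = (0, 0, 0) := by simp [pvDstep, hp]
        rw [List.foldl_cons, List.foldl_cons, h1, h2, ih b 0 t hb le_rfl]

-- the overlapping segment of A's guarded scan is exactly the diagonal walk
lemma pv_mid (la lb : List Char) (shift : Int) :
    ∀ (k : Nat) (i0 : Int) (c t mc : Int), 0 ≤ i0 → 0 ≤ i0 - shift →
      (k : Int) = min ((la.length : Int) - i0) ((lb.length : Int) - (i0 - shift)) →
      (PySem.List.pyRange i0 (i0 + k) 1).foldl (pvAstep la lb shift) (c, t, mc) =
        ((((la.drop i0.toNat).zip (lb.drop (i0 - shift).toNat)).foldl pvDstep (mc, c, t)).2.1,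
         (((la.drop i0.toNat).zip (lb.drop (i0 - shift).toNat)).foldl pvDstep (mc, c, t)).2.2,
         (((la.drop i0.toNat).zip (lb.drop (i0 - shift).toNat)).foldl pvDstep (mc, c, t)).1) := by
  intro k
  induction k with
  | zero =>
      intro i0 c t mc hi hj hk
      have hz : (la.drop i0.toNat).zip (lb.drop (i0 - shift).toNat) = [] := by
        apply List.eq_nil_of_length_eq_zero
        have h1 := List.length_drop (l := la) (i := i0.toNat)
        have h2 := List.length_drop (l := lb) (i := (i0 - shift).toNat)
        rw [List.length_zip, h1, h2]
        omega
      have hr0 : PySem.List.pyRange i0 (i0 + ((0 : Nat) : Int)) 1 = [] :=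
        PySem.List.pyRange_one_eq_nil (by omega)
      rw [hr0, hz]
      simp
  | succ k ih =>
      intro i0 c t mc hi hj hk
      have hin : i0.toNat < la.length := by omega
      have hjn : (i0 - shift).toNat < lb.length := by omega
      have hra : PySem.List.pyRange i0 (i0 + ((k + 1 : Nat) : Int)) 1 =
          i0 :: PySem.List.pyRange (i0 + 1) (i0 + ((k + 1 : Nat) : Int)) 1 :=
        PySem.List.pyRange_one_cons (by push_cast; omega)
      have hend : i0 + ((k + 1 : Nat) : Int) = (i0 + 1) + ((k : Nat) : Int) := by push_cast; ring
      have hda : la.drop i0.toNat = la[i0.toNat] :: la.drop (i0.toNat + 1) :=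
        List.drop_eq_getElem_cons hin
      have hdb : lb.drop (i0 - shift).toNat = lb[(i0 - shift).toNat] :: lb.drop ((i0 - shift).toNat + 1) :=
        List.drop_eq_getElem_cons hjn
      have hga : PySem.List.pyGet? la i0 = some la[i0.toNat] :=
        PySem.List.pyGet?_eq_some_getElem la hi (by omega)
      have hgb : PySem.List.pyGet? lb (i0 - shift) = some lb[(i0 - shift).toNat] :=
        PySem.List.pyGet?_eq_some_getElem lb hj (by omega)
      have hguard : (0 ≤ i0 - shift ∧ i0 - shift < (lb.length : Int)) := ⟨hj, by omega⟩
      have hta : (i0 + 1).toNat = i0.toNat + 1 := by omega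
      have htb : (i0 + 1 - shift).toNat = (i0 - shift).toNat + 1 := by omega
      rw [hra, hend, List.foldl_cons, hda, hdb, List.zip_cons_cons, List.foldl_cons]
      by_cases hx : la[i0.toNat] = lb[(i0 - shift).toNat]
      · have hA : pvAstep la lb shift (c, t, mc) i0 = (c + 1, t + 1, max mc (c + 1)) := by
          simp only [pvAstep, if_pos hguard, hga, hgb]
          exact if_pos (by rw [hx])
        have hB : pvDstep (mc, c, t) (la[i0.toNat], lb[(i0 - shift).toNat]) =
            (max mc (c + 1), c + 1, t + 1) := by
          simp only [pvDstep, if_pos hx]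
          refine Prod.ext ?_ rfl
          simp; omega
        rw [hA, hB]
        have := ih (i0 + 1) (c + 1) (t + 1) (max mc (c + 1)) (by omega) (by omega) (by omega)
        rw [hta, htb] at this
        exact this
      · have hA : pvAstep la lb shift (c, t, mc) i0 = (0, t, mc) := by
          simp only [pvAstep, if_pos hguard, hga, hgb]
          rw [if_neg (by simpa using hx)]
        have hB : pvDstep (mc, c, t) (la[i0.toNat], lb[(i0 - shift).toNat]) = (mc, 0, t) := by
          simp [pvDstep, hx]
        rw [hA, hB]
        have := ih (i0 + 1) 0 t mc (by omega) (by omega) (by omega)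
        rw [hta, htb] at this
        exact this

-- one shift: A's full guarded scan equals the walk of the overlap slices
lemma pv_shift (la lb : List Char) (shift mc mt : Int) (hmc : 0 ≤ mc)
    (h1 : -(lb.length : Int) + 1 ≤ shift) (h2 : shift < (la.length : Int)) :
    pvAbody la lb (mc, mt) shift = pvDiag la lb (mc, mt) shift := by
  have hi0 : (if shift > 0 then shift else 0) = max shift 0 := by split_ifs <;> omega
  set n : Int := (la.length : Int) with hn
  set m : Int := (lb.length : Int) with hm
  have hn0 : 0 ≤ n := by positivity
  have hm0 : 0 ≤ m := by positivity
  set i0 : Int := max shift 0 with hdefi0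
  set e : Int := min n (m + shift) with hdefe
  have hi0e : i0 ≤ e := by omega
  have hen : e ≤ n := by omega
  have hi00 : 0 ≤ i0 := by omega
  have hj00 : 0 ≤ i0 - shift := by omega
  have hsplit : PySem.List.pyRange 0 n 1 =
      PySem.List.pyRange 0 i0 1 ++ (PySem.List.pyRange i0 e 1 ++ PySem.List.pyRange e n 1) := by
    rw [← PySem.List.pyRange_one_append i0 e n hi0e hen,
        ← PySem.List.pyRange_one_append 0 i0 n hi00 (by omega)]
  have hpre : ∀ (st : Int × Int × Int),
      (PySem.List.pyRange 0 i0 1).foldl (pvAstep la lb shift) st = st := by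
    intro st
    refine (PySem.List.foldl_congr_mem _ _ (fun s (_ : Int) => s) st ?_).trans
      (pv_foldl_const _ _)
    intro acc x hx
    have hx' := (PySem.List.mem_pyRange_one).1 hx
    simp only [pvAstep]
    rw [if_neg]
    rintro ⟨hA, hB⟩
    omega
  have hpost : ∀ (st : Int × Int × Int),
      (PySem.List.pyRange e n 1).foldl (pvAstep la lb shift) st = st := by
    intro st
    refine (PySem.List.foldl_congr_mem _ _ (fun s (_ : Int) => s) st ?_).trans
      (pv_foldl_const _ _)
    intro acc x hx
    have hx' := (PySem.List.mem_pyRange_one).1 hx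
    simp only [pvAstep]
    rw [if_neg]
    rintro ⟨hA, hB⟩
    omega
  have hmid := pv_mid la lb shift (e - i0).toNat i0 0 0 mc hi00 hj00 (by omega)
  have hrange : i0 + (((e - i0).toNat : Nat) : Int) = e := by omega
  rw [hrange] at hmid
  set Z := (la.drop i0.toNat).zip (lb.drop (i0 - shift).toNat) with hZ
  have hsep := pv_sep Z mc 0 0 hmc le_rfl
  show pvAbody la lb (mc, mt) shift = pvDiag la lb (mc, mt) shift
  rw [pvAbody, pvDiag]
  simp only [hi0, ← hn]
  rw [PySem.List.slice_from _ hi00, PySem.List.slice_from _ hj00, ← hZ]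
  rw [hsplit, List.foldl_append, List.foldl_append, hpre, hmid, hpost, hsep]
  refine Prod.ext rfl ?_
  simp

lemma pv_outer (la lb : List Char) :
    ∀ (L : List Int), (∀ s ∈ L, -(lb.length : Int) + 1 ≤ s ∧ s < (la.length : Int)) →
    ∀ (st : Int × Int), 0 ≤ st.1 →
      L.foldl (pvAbody la lb) st = L.foldl (pvDiag la lb) st := by
  intro L
  induction L with
  | nil => intro _ st _; rfl
  | cons s L ih =>
      intro hL st hst
      have hs := hL s (List.mem_cons_self ..)
      rw [List.foldl_cons, List.foldl_cons]
      have hb : pvAbody la lb st s = pvDiag la lb st s := by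
        obtain ⟨mc, mt⟩ := st
        exact pv_shift la lb s mc mt hst hs.1 hs.2
      rw [hb]
      refine ih (fun x hx => hL x (List.mem_cons_of_mem _ hx)) _ ?_
      obtain ⟨mc, mt⟩ := st
      simp only [pvDiag]
      exact le_trans hst (le_max_left _ _)

-- cell-level specification values shared by both sides
def pvMatch (la lb : List Char) (i j : Nat) : Bool := la.getD i ' ' == lb.getD j ' '

-- run length of complementary matches ending at cell (i, j) of the grid
def pvRun (la lb : List Char) : Nat → Nat → Int
  | 0, j => if la.getD 0 ' ' = lb.getD j ' ' then 1 else 0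
  | i+1, 0 => if la.getD (i+1) ' ' = lb.getD 0 ' ' then 1 else 0
  | i+1, j+1 => if la.getD (i+1) ' ' = lb.getD (j+1) ' ' then pvRun la lb i j + 1 else 0

lemma pvRun_eq (la lb : List Char) (i j : Nat) :
    pvRun la lb i j =
      if la.getD i ' ' = lb.getD j ' '
      then (if i = 0 ∨ j = 0 then 0 else pvRun la lb (i-1) (j-1)) + 1
      else 0 := by
  match i, j with
  | 0, j => simp [pvRun]
  | i+1, 0 => simp [pvRun]
  | i+1, j+1 => simp [pvRun]

lemma pvRun_nonneg (la lb : List Char) : ∀ i j, 0 ≤ pvRun la lb i j := by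
  intro i
  induction i with
  | zero => intro j; rw [pvRun_eq]; split_ifs <;> omega
  | succ i ih =>
      intro j
      rw [pvRun_eq]
      split_ifs with h1 h2
      · omega
      · have := ih (j - 1)
        simp only [Nat.add_sub_cancel]
        omega
      · omega

-- per-diagonal summary values: overlap length, best run, total matches
def pvK (la lb : List Char) (s : Int) : Nat :=
  min (la.length - s.toNat) (lb.length - (-s).toNat)

def pvDV1 (la lb : List Char) (s : Int) : Int :=
  pvLMax (List.range (pvK la lb s)) (fun t => pvRun la lb (s.toNat + t) ((-s).toNat + t))

def pvDV2 (la lb : List Char) (s : Int) : Int :=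
  (((List.range (pvK la lb s)).countP
      (fun t => pvMatch la lb (s.toNat + t) ((-s).toNat + t)) : Nat) : Int)

-- the diagonal walk computes the best run and total of pvRun values on the diagonal
lemma pvG (la lb : List Char) :
    ∀ (k i j : Nat) (r : Int),
      k = min (la.length - i) (lb.length - j) → 0 ≤ r →
      (la.getD i ' ' = lb.getD j ' ' → pvRun la lb i j = r + 1) →
      (((la.drop i).zip (lb.drop j)).foldl pvDstep (0, r, 0)).1
          = pvLMax (List.range k) (fun t => pvRun la lb (i + t) (j + t))
      ∧ (((la.drop i).zip (lb.drop j)).foldl pvDstep (0, r, 0)).2.2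
          = (((List.range k).countP (fun t => pvMatch la lb (i + t) (j + t)) : Nat) : Int) := by
  intro k
  induction k with
  | zero =>
      intro i j r hk hr hrun
      have hz : (la.drop i).zip (lb.drop j) = [] := by
        apply List.eq_nil_of_length_eq_zero
        rw [List.length_zip, List.length_drop, List.length_drop]
        omega
      simp [hz, pvLMax]
  | succ k ih =>
      intro i j r hk hr hrun
      have hin : i < la.length := by omega
      have hjn : j < lb.length := by omega
      have hga : la.getD i ' ' = la[i] := List.getD_eq_getElem la ' ' hin
      have hgb : lb.getD j ' ' = lb[j] := List.getD_eq_getElem lb ' ' hjn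
      rw [List.drop_eq_getElem_cons hin, List.drop_eq_getElem_cons hjn,
        List.zip_cons_cons, List.foldl_cons]
      by_cases hx : la[i] = lb[j]
      · have hr1 : pvRun la lb i j = r + 1 := hrun (by rw [hga, hgb]; exact hx)
        have hstep : pvDstep (0, r, 0) (la[i], lb[j]) = (r + 1, r + 1, 1) := by
          simp only [pvDstep, if_pos hx]
          refine Prod.ext ?_ rfl
          simp; omega
        rw [hstep]
        have hrun' : la.getD (i+1) ' ' = lb.getD (j+1) ' ' →
            pvRun la lb (i+1) (j+1) = (r + 1) + 1 := by
          intro h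
          rw [pvRun_eq, if_pos h, if_neg (by omega : ¬(i + 1 = 0 ∨ j + 1 = 0))]
          simp only [Nat.add_sub_cancel]
          omega
        obtain ⟨ih1, ih2⟩ := ih (i+1) (j+1) (r+1) (by omega) (by omega) hrun'
        have hsep := pv_sep ((la.drop (i+1)).zip (lb.drop (j+1))) (r+1) (r+1) 1
          (by omega) (by omega)
        rw [hsep]
        constructor
        · show max (r + 1) _ = _
          rw [ih1, pvLMax_range_shift]
          have e1 : pvLMax (List.range k) (fun t => pvRun la lb (i + (t + 1)) (j + (t + 1)))
              = pvLMax (List.range k) (fun t => pvRun la lb (i + 1 + t) (j + 1 + t)) := by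
            refine pvLMax_congr (fun t _ => ?_)
            rw [show i + (t + 1) = i + 1 + t from by omega,
                show j + (t + 1) = j + 1 + t from by omega]
          rw [e1]
          have : pvRun la lb (i + 0) (j + 0) = r + 1 := by simpa using hr1
          rw [this]
        · show 1 + _ = _
          rw [ih2, pvCountP_range_shift]
          have hp0 : pvMatch la lb (i + 0) (j + 0) = true := by
            simp only [Nat.add_zero, pvMatch]
            rw [hga, hgb]
            exact beq_iff_eq.2 hx
          rw [hp0]
          have e2 : (List.range k).countP (fun t => pvMatch la lb (i + (t + 1)) (j + (t + 1)))
              = (List.range k).countP (fun t => pvMatch la lb (i + 1 + t) (j + 1 + t)) := by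
            refine List.countP_congr (fun t _ => ?_)
            rw [show i + (t + 1) = i + 1 + t from by omega,
                show j + (t + 1) = j + 1 + t from by omega]
          rw [if_pos rfl, e2]
          push_cast
          omega
      · have hr0 : pvRun la lb i j = 0 := by
          rw [pvRun_eq, if_neg (by rw [hga, hgb]; exact hx)]
        have hstep : pvDstep (0, r, 0) (la[i], lb[j]) = (0, 0, 0) := by
          simp [pvDstep, hx]
        rw [hstep]
        have hrun' : la.getD (i+1) ' ' = lb.getD (j+1) ' ' →
            pvRun la lb (i+1) (j+1) = 0 + 1 := by
          intro h
          rw [pvRun_eq, if_pos h, if_neg (by omega : ¬(i + 1 = 0 ∨ j + 1 = 0))]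
          simp only [Nat.add_sub_cancel]
          omega
        obtain ⟨ih1, ih2⟩ := ih (i+1) (j+1) 0 (by omega) le_rfl hrun'
        constructor
        · rw [ih1, pvLMax_range_shift]
          have e1 : pvLMax (List.range k) (fun t => pvRun la lb (i + (t + 1)) (j + (t + 1)))
              = pvLMax (List.range k) (fun t => pvRun la lb (i + 1 + t) (j + 1 + t)) := by
            refine pvLMax_congr (fun t _ => ?_)
            rw [show i + (t + 1) = i + 1 + t from by omega,
                show j + (t + 1) = j + 1 + t from by omega]
          rw [e1]
          have h00 : pvRun la lb (i + 0) (j + 0) = 0 := by simpa using hr0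
          rw [h00]
          have := pvLMax_nonneg (List.range k) (fun t => pvRun la lb (i + 1 + t) (j + 1 + t))
          omega
        · rw [ih2, pvCountP_range_shift]
          have hp0 : pvMatch la lb (i + 0) (j + 0) = false := by
            simp only [Nat.add_zero, pvMatch]
            rw [hga, hgb]
            exact beq_eq_false_iff_ne.2 hx
          rw [hp0]
          have e2 : (List.range k).countP (fun t => pvMatch la lb (i + (t + 1)) (j + (t + 1)))
              = (List.range k).countP (fun t => pvMatch la lb (i + 1 + t) (j + 1 + t)) := by
            refine List.countP_congr (fun t _ => ?_)
            rw [show i + (t + 1) = i + 1 + t from by omega,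
                show j + (t + 1) = j + 1 + t from by omega]
          rw [if_neg (by simp), e2]
          push_cast
          omega

-- the per-shift body in terms of the per-diagonal summary values
lemma pvDiag_eq (la lb : List Char) (st : Int × Int) (s : Int) :
    pvDiag la lb st s = (max st.1 (pvDV1 la lb s), max st.2 (pvDV2 la lb s)) := by
  have hi0 : (0 : Int) ≤ (if s > 0 then s else 0) := by split_ifs <;> omega
  have hj0 : (0 : Int) ≤ (if s > 0 then s else 0) - s := by split_ifs <;> omega
  have hta : ((if s > 0 then s else 0) : Int).toNat = s.toNat := by split_ifs <;> omega
  have htb : (((if s > 0 then s else 0) : Int) - s).toNat = (-s).toNat := by split_ifs <;> omega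
  have hrun : la.getD s.toNat ' ' = lb.getD (-s).toNat ' ' →
      pvRun la lb s.toNat (-s).toNat = 0 + 1 := by
    intro h
    rw [pvRun_eq, if_pos h, if_pos (by omega)]
  obtain ⟨h1, h2⟩ := pvG la lb (pvK la lb s) s.toNat (-s).toNat 0 rfl le_rfl hrun
  rw [pvDiag]
  rw [PySem.List.slice_from _ hi0, PySem.List.slice_from _ hj0, hta, htb]
  rw [pvDV1, pvDV2] at *
  rw [← h1, ← h2]

-- the fold of per-shift bodies splits into two running maxima
lemma pv_outer2 (la lb : List Char) :
    ∀ (L : List Int) (st : Int × Int),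
      L.foldl (pvDiag la lb) st =
        (L.foldl (fun a s => max a (pvDV1 la lb s)) st.1,
         L.foldl (fun a s => max a (pvDV2 la lb s)) st.2) := by
  intro L
  induction L with
  | nil => intro st; rfl
  | cons s L ih =>
      intro st
      rw [List.foldl_cons, List.foldl_cons, List.foldl_cons, pvDiag_eq, ih]

-- ---- B-side invariants ----

-- did row i contribute a match to diagonal d (array index d = i + (m-1-j))?
def pvHit (la lb : List Char) (i d : Nat) : Bool :=
  decide (i ≤ d ∧ d < i + lb.length) && pvMatch la lb i (i + lb.length - 1 - d)

-- matches on diagonal d among the first i full rows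
def pvCfull (la lb : List Char) (i d : Nat) : Int :=
  (((List.range i).countP (fun i' => pvHit la lb i' d) : Nat) : Int)

-- matches on diagonal d after i full rows plus the first j cells of row i
def pvC (la lb : List Char) (i j d : Nat) : Int :=
  pvCfull la lb i d + (if pvHit la lb i d = true ∧ i + lb.length - 1 - d < j then 1 else 0)

lemma pvHit_bounds {la lb : List Char} {i d : Nat} (h : pvHit la lb i d = true) :
    i ≤ d ∧ d < i + lb.length := by
  unfold pvHit at h
  simp only [Bool.and_eq_true, decide_eq_true_eq] at h
  exact h.1

lemma pvHit_false_of {la lb : List Char} {i d : Nat}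
    (h : ¬ (i ≤ d ∧ d < i + lb.length)) : pvHit la lb i d = false := by
  simp [pvHit, decide_eq_false h]

lemma pvHit_at (la lb : List Char) (i j : Nat) (hj : j < lb.length) :
    pvHit la lb i (i + (lb.length - 1 - j)) = pvMatch la lb i j := by
  have hcond : i ≤ i + (lb.length - 1 - j) ∧ i + (lb.length - 1 - j) < i + lb.length := by omega
  have hcol : i + lb.length - 1 - (i + (lb.length - 1 - j)) = j := by omega
  simp [pvHit, hcond, hcol]

lemma pvC_succ (la lb : List Char) (i j d : Nat) (hj : j < lb.length) :
    pvC la lb i (j + 1) d =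
      pvC la lb i j d +
        (if pvMatch la lb i j = true ∧ d = i + (lb.length - 1 - j) then 1 else 0) := by
  unfold pvC
  by_cases hd : d = i + (lb.length - 1 - j)
  · subst hd
    rw [pvHit_at la lb i j hj]
    by_cases hm : pvMatch la lb i j = true
    · have hcol : i + lb.length - 1 - (i + (lb.length - 1 - j)) = j := by omega
      rw [hcol]
      simp [hm]
    · simp [hm]
  · by_cases hh : pvHit la lb i d = true
    · obtain ⟨hb1, hb2⟩ := pvHit_bounds hh
      have hcol : i + lb.length - 1 - d ≠ j := by omega
      have : (i + lb.length - 1 - d < j + 1) ↔ (i + lb.length - 1 - d < j) := by omega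
      simp [hh, this, hd]
    · simp [hh, hd]

lemma pvC_zero (la lb : List Char) (i d : Nat) : pvC la lb i 0 d = pvCfull la lb i d := by
  simp [pvC]

lemma pvC_top (la lb : List Char) (i d : Nat) :
    pvC la lb i lb.length d = pvCfull la lb (i + 1) d := by
  unfold pvC pvCfull
  rw [List.range_succ, List.countP_append]
  by_cases hh : pvHit la lb i d = true
  · obtain ⟨hb1, hb2⟩ := pvHit_bounds hh
    have hcol : i + lb.length - 1 - d < lb.length := by omega
    simp [hh, hcol]
  · simp [hh]

-- getD after set, within bounds
lemma pv_getD_set (l : List Int) (k idx : Nat) (v : Int) (hk : k < l.length) :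
    (l.set k v).getD idx 0 = if idx = k then v else l.getD idx 0 := by
  rw [List.getD_eq_getElem?_getD, List.getD_eq_getElem?_getD, List.getElem?_set]
  by_cases h : idx = k
  · simp [h, hk]
  · rw [if_neg h, if_neg (fun hh => h hh.symm)]

def pvRowsMax (la lb : List Char) (i : Nat) : Int :=
  pvLMax (List.range i) (fun i' => pvLMax (List.range lb.length) (fun j' => pvRun la lb i' j'))

def pvInnerInv (la lb : List Char) (i j : Nat) (st : Int × Int × List Int × List Int) : Prop :=
  st.1 = max (pvRowsMax la lb i) (pvLMax (List.range j) (fun j' => pvRun la lb i j'))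
  ∧ st.2.1 = pvLMax (List.range (la.length + lb.length - 1)) (fun d => pvC la lb i j d)
  ∧ st.2.2.1.length = la.length + lb.length - 1
  ∧ (∀ d, d < la.length + lb.length - 1 → st.2.2.1.getD d 0 = pvC la lb i j d)
  ∧ st.2.2.2.length = lb.length + 1
  ∧ (∀ idx, st.2.2.2.getD idx 0 = if 1 ≤ idx ∧ idx ≤ j then pvRun la lb i (idx - 1) else 0)

def pvPrevInv (la lb : List Char) (i : Nat) (prev : List Int) : Prop :=
  ∀ idx, prev.getD idx 0 =
    if 1 ≤ idx ∧ idx ≤ lb.length ∧ 1 ≤ i then pvRun la lb (i - 1) (idx - 1) else 0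

lemma pvInner (la lb : List Char) (prev : List Int) (i : Nat) (hin : i < la.length)
    (hprev : pvPrevInv la lb i prev) :
    ∀ (j : Nat), j ≤ lb.length → ∀ st, pvInnerInv la lb i 0 st →
      pvInnerInv la lb i j ((List.range j).foldl (pvBcell la lb prev i) st) := by
  intro j
  induction j with
  | zero => intro _ st h0; exact h0
  | succ j ihj =>
      intro hj st h0
      have hjm : j < lb.length := by omega
      obtain ⟨H1, H2, H3, H4, H5, H6⟩ := ihj (by omega) st h0
      set st' := (List.range j).foldl (pvBcell la lb prev i) st with hst'
      rw [List.range_succ, List.foldl_append, List.foldl_cons, List.foldl_nil, ← hst']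
      have hd_lt : i + (lb.length - 1 - j) < la.length + lb.length - 1 := by omega
      by_cases hx : la.getD i ' ' = lb.getD j ' '
      · -- matched cell
        have hmx : pvMatch la lb i j = true := beq_iff_eq.2 hx
        have hprevj : prev.getD j 0 + 1 = pvRun la lb i j := by
          rw [pvRun_eq, if_pos hx, hprev j]
          by_cases h0j : i = 0 ∨ j = 0
          · rcases h0j with h | h <;> simp [h]
          · have : (1 ≤ j ∧ j ≤ lb.length ∧ 1 ≤ i) := by omega
            rw [if_pos this, if_neg h0j]
        have hrun_j : 0 ≤ pvRun la lb i j := pvRun_nonneg la lb i j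
        have hCd : pvC la lb i (j+1) (i + (lb.length - 1 - j)) =
            pvC la lb i j (i + (lb.length - 1 - j)) + 1 := by
          rw [pvC_succ la lb i j _ hjm]
          simp [hmx]
        have hCne : ∀ d, d ≠ i + (lb.length - 1 - j) →
            pvC la lb i (j+1) d = pvC la lb i j d := by
          intro d hd
          rw [pvC_succ la lb i j d hjm]
          simp [hd]
        rw [pvBcell, if_pos hx]
        refine ⟨?_, ?_, ?_, ?_, ?_, ?_⟩
        · -- max consecutive
          show (if prev.getD j 0 + 1 > st'.1 then prev.getD j 0 + 1 else st'.1) = _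
          rw [H1, pvLMax_range_succ, hprevj]
          have h1 := pvLMax_nonneg (List.range j) (fun j' => pvRun la lb i j')
          have h2 : 0 ≤ pvRowsMax la lb i := by
            unfold pvRowsMax; exact pvLMax_nonneg _ _
          split_ifs <;> omega
        · -- max total
          show (if st'.2.2.1.getD (i + (lb.length - 1 - j)) 0 + 1 > st'.2.1
                then st'.2.2.1.getD (i + (lb.length - 1 - j)) 0 + 1 else st'.2.1) = _
          rw [H4 _ hd_lt, H2]
          have hc_le : pvC la lb i j (i + (lb.length - 1 - j)) + 1
              ≤ pvLMax (List.range (la.length + lb.length - 1)) (fun d => pvC la lb i (j+1) d) := by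
            rw [← hCd]
            exact le_pvLMax _ (List.mem_range.2 hd_lt)
          have hold_le : pvLMax (List.range (la.length + lb.length - 1)) (fun d => pvC la lb i j d)
              ≤ pvLMax (List.range (la.length + lb.length - 1)) (fun d => pvC la lb i (j+1) d) := by
            refine pvLMax_le (pvLMax_nonneg _ _) (fun d hd => ?_)
            by_cases hdd : d = i + (lb.length - 1 - j)
            · subst hdd
              have hle : pvC la lb i (j+1) (i + (lb.length - 1 - j))
                  ≤ pvLMax (List.range (la.length + lb.length - 1))
                      (fun d => pvC la lb i (j+1) d) := le_pvLMax _ hd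
              omega
            · rw [← hCne d hdd]
              exact le_pvLMax _ hd
          have hub : pvLMax (List.range (la.length + lb.length - 1)) (fun d => pvC la lb i (j+1) d)
              ≤ max (pvLMax (List.range (la.length + lb.length - 1)) (fun d => pvC la lb i j d))
                  (pvC la lb i j (i + (lb.length - 1 - j)) + 1) := by
            refine pvLMax_le
              (le_trans (pvLMax_nonneg _ _) (le_max_left _ _)) (fun d hd => ?_)
            by_cases hdd : d = i + (lb.length - 1 - j)
            · subst hdd
              rw [hCd]
              exact le_max_right _ _
            · rw [hCne d hdd]
              have hle : pvC la lb i j d ≤ pvLMax (List.range (la.length + lb.length - 1))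
                  (fun d => pvC la lb i j d) := le_pvLMax _ hd
              exact le_trans hle (le_max_left _ _)
          have hub' := le_max_iff.1 hub
          split_ifs <;> rcases hub' with h | h <;> omega
        · rw [List.length_set]; exact H3
        · intro d hd
          rw [pv_getD_set _ _ _ _ (by omega)]
          by_cases hdd : d = i + (lb.length - 1 - j)
          · subst hdd
            rw [if_pos rfl, hCd, ← H4 _ hd_lt]
          · rw [if_neg hdd, H4 _ hd, hCne d hdd]
        · rw [List.length_set]; exact H5
        · intro idx
          rw [pv_getD_set _ _ _ _ (by omega)]
          by_cases hidx : idx = j + 1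
          · rw [if_pos hidx, hidx]
            rw [if_pos (by omega)]
            simp only [Nat.add_sub_cancel]
            exact hprevj
          · rw [if_neg hidx, H6 idx]
            have : (1 ≤ idx ∧ idx ≤ j) ↔ (1 ≤ idx ∧ idx ≤ j + 1) := by omega
            rw [if_congr this rfl rfl]
      · -- unmatched cell
        have hmx : pvMatch la lb i j = false := beq_eq_false_iff_ne.2 hx
        have hr0 : pvRun la lb i j = 0 := by rw [pvRun_eq, if_neg hx]
        have hCne : ∀ d, pvC la lb i (j+1) d = pvC la lb i j d := by
          intro d
          rw [pvC_succ la lb i j d hjm]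
          simp [hmx]
        rw [pvBcell, if_neg hx]
        refine ⟨?_, ?_, H3, ?_, H5, ?_⟩
        · rw [H1, pvLMax_range_succ, hr0]
          have := pvLMax_nonneg (List.range j) (fun j' => pvRun la lb i j')
          omega
        · rw [H2]
          exact (pvLMax_congr (fun d _ => (hCne d).symm)).symm ▸ rfl
        · intro d hd
          rw [H4 d hd, hCne d]
        · intro idx
          rw [H6 idx]
          by_cases hidx : idx = j + 1
          · rw [hidx]
            rw [if_neg (by omega), if_pos (by omega)]
            simp only [Nat.add_sub_cancel]
            omega
          · have : (1 ≤ idx ∧ idx ≤ j) ↔ (1 ≤ idx ∧ idx ≤ j + 1) := by omega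
            rw [if_congr this rfl rfl]

def pvOuterInv (la lb : List Char) (i : Nat) (st : Int × Int × List Int × List Int) : Prop :=
  st.1 = pvRowsMax la lb i
  ∧ st.2.1 = pvLMax (List.range (la.length + lb.length - 1)) (fun d => pvCfull la lb i d)
  ∧ st.2.2.1.length = la.length + lb.length - 1
  ∧ (∀ d, d < la.length + lb.length - 1 → st.2.2.1.getD d 0 = pvCfull la lb i d)
  ∧ pvPrevInv la lb i st.2.2.2

lemma pv_getD_replicate (n idx : Nat) : (List.replicate n (0 : Int)).getD idx 0 = 0 := by
  by_cases h : idx < n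
  · exact List.getD_replicate _ h
  · rw [List.getD_eq_default]
    simp
    omega

lemma pvOuter (la lb : List Char) :
    ∀ (i : Nat), i ≤ la.length →
      pvOuterInv la lb i ((List.range i).foldl (pvBrow la lb)
        (0, 0, List.replicate (la.length + lb.length - 1) 0,
          List.replicate (lb.length + 1) 0)) := by
  intro i
  induction i with
  | zero =>
      intro _
      simp only [List.range_zero, List.foldl_nil]
      refine ⟨rfl, ?_, ?_, ?_, ?_⟩
      · show (0 : Int) = _
        rw [pvLMax_congr (g := fun _ => (0 : Int)) (fun d _ => by simp [pvCfull]), pvLMax_zero]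
      · simp
      · intro d _
        rw [pv_getD_replicate]
        simp [pvCfull]
      · intro idx
        rw [pv_getD_replicate]
        simp
  | succ i ihi =>
      intro hi
      have hin : i < la.length := by omega
      obtain ⟨H1, H2, H3, H4, H5⟩ := ihi (by omega)
      set st := (List.range i).foldl (pvBrow la lb)
        (0, 0, List.replicate (la.length + lb.length - 1) 0,
          List.replicate (lb.length + 1) 0) with hst
      rw [List.range_succ, List.foldl_append, List.foldl_cons, List.foldl_nil, ← hst]
      have h0 : pvInnerInv la lb i 0 (st.1, st.2.1, st.2.2.1, List.replicate (lb.length + 1) 0) := by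
        refine ⟨?_, ?_, H3, ?_, by simp, ?_⟩
        · show st.1 = _
          rw [H1, List.range_zero, pvLMax_nil]
          have h2 : 0 ≤ pvRowsMax la lb i := by
            unfold pvRowsMax; exact pvLMax_nonneg _ _
          omega
        · show st.2.1 = _
          rw [H2]
          exact pvLMax_congr (fun d _ => (pvC_zero la lb i d).symm)
        · intro d hd
          show st.2.2.1.getD d 0 = _
          rw [H4 d hd, pvC_zero]
        · intro idx
          rw [pv_getD_replicate, if_neg (by omega)]
      have hres := pvInner la lb st.2.2.2 i hin H5 lb.length le_rfl _ h0
      obtain ⟨R1, R2, R3, R4, R5, R6⟩ := hres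
      refine ⟨?_, ?_, R3, ?_, ?_⟩
      · rw [pvBrow, R1]
        unfold pvRowsMax
        rw [pvLMax_range_succ]
      · rw [pvBrow, R2]
        exact pvLMax_congr (fun d _ => pvC_top la lb i d)
      · intro d hd
        rw [pvBrow, R4 d hd, pvC_top]
      · intro idx
        rw [pvBrow, R6 idx, Nat.add_sub_cancel]
        exact if_congr (by omega) rfl rfl

-- ---- bridging the two characterizations ----

lemma pvEq1 (la lb : List Char) :
    pvLMax (PySem.List.pyRange (-(lb.length : Int) + 1) (la.length : Int) 1)
        (fun s => pvDV1 la lb s)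
      = pvRowsMax la lb la.length := by
  apply le_antisymm
  · refine pvLMax_le (pvLMax_nonneg _ _) (fun s hs => ?_)
    have hsb := (PySem.List.mem_pyRange_one).1 hs
    refine pvLMax_le (pvLMax_nonneg _ _) (fun t ht => ?_)
    have ht' := List.mem_range.1 ht
    have hik : s.toNat + t < la.length := by unfold pvK at ht'; omega
    have hjk : (-s).toNat + t < lb.length := by unfold pvK at ht'; omega
    calc pvRun la lb (s.toNat + t) ((-s).toNat + t)
        ≤ pvLMax (List.range lb.length) (fun j' => pvRun la lb (s.toNat + t) j') :=
          le_pvLMax _ (List.mem_range.2 hjk)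
      _ ≤ pvRowsMax la lb la.length := le_pvLMax _ (List.mem_range.2 hik)
  · refine pvLMax_le (pvLMax_nonneg _ _) (fun i hi => ?_)
    have hi' := List.mem_range.1 hi
    refine pvLMax_le (pvLMax_nonneg _ _) (fun j hj => ?_)
    have hj' := List.mem_range.1 hj
    set s : Int := (i : Int) - (j : Int) with hsdef
    have hsS : s ∈ PySem.List.pyRange (-(lb.length : Int) + 1) (la.length : Int) 1 :=
      (PySem.List.mem_pyRange_one).2 ⟨by omega, by omega⟩
    have hti : s.toNat + min i j = i := by omega
    have htj : (-s).toNat + min i j = j := by omega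
    have htk : min i j < pvK la lb s := by unfold pvK; omega
    calc pvRun la lb i j
        = pvRun la lb (s.toNat + min i j) ((-s).toNat + min i j) := by rw [hti, htj]
      _ ≤ pvDV1 la lb s := le_pvLMax _ (List.mem_range.2 htk)
      _ ≤ _ := le_pvLMax _ hsS

lemma pvCountWindow (q : Nat → Bool) :
    ∀ (n i0 k : Nat), i0 + k ≤ n →
      (∀ i', i' < i0 → q i' = false) →
      (∀ i', i0 + k ≤ i' → i' < n → q i' = false) →
      (List.range n).countP q = (List.range k).countP (fun t => q (i0 + t)) := by
  intro n i0 k h hlo hhi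
  have hn : n = (i0 + k) + (n - i0 - k) := by omega
  rw [hn, List.range_add, List.countP_append, List.range_add, List.countP_append,
    List.countP_map, List.countP_map]
  have z1 : (List.range i0).countP q = 0 := by
    rw [List.countP_eq_zero]
    intro a ha
    simp [hlo a (List.mem_range.1 ha)]
  have z2 : (List.range (n - i0 - k)).countP (q ∘ fun x => i0 + k + x) = 0 := by
    rw [List.countP_eq_zero]
    intro a ha
    have := List.mem_range.1 ha
    simp only [Function.comp]
    simp [hhi (i0 + k + a) (by omega) (by omega)]
  rw [z1, z2]
  have : (q ∘ fun x => i0 + x) = fun t => q (i0 + t) := rfl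
  rw [this]
  omega

lemma pvCntTransfer (la lb : List Char) (s : Int)
    (hs1 : -(lb.length : Int) + 1 ≤ s) (hs2 : s < (la.length : Int)) :
    pvDV2 la lb s = pvCfull la lb la.length (s + (lb.length : Int) - 1).toNat := by
  unfold pvDV2 pvCfull
  congr 1
  symm
  rw [pvCountWindow (fun i' => pvHit la lb i' (s + (lb.length : Int) - 1).toNat)
    la.length s.toNat (pvK la lb s) (by unfold pvK; omega) ?lo ?hi]
  · refine List.countP_congr (fun t ht => ?_)
    have ht' := List.mem_range.1 ht
    have hbk : s.toNat + t ≤ (s + (lb.length : Int) - 1).toNat ∧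
        (s + (lb.length : Int) - 1).toNat < s.toNat + t + lb.length := by
      unfold pvK at ht'; omega
    have hcol : s.toNat + t + lb.length - 1 - (s + (lb.length : Int) - 1).toNat
        = (-s).toNat + t := by
      unfold pvK at ht'; omega
    have hhit : pvHit la lb (s.toNat + t) ((s + (lb.length : Int) - 1).toNat)
        = pvMatch la lb (s.toNat + t) ((-s).toNat + t) := by
      unfold pvHit
      rw [hcol, decide_eq_true hbk, Bool.true_and]
    rw [hhit]
  case lo =>
    intro i' hi'
    refine pvHit_false_of ?_
    omega
  case hi =>
    intro i' h1 h2
    refine pvHit_false_of ?_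
    unfold pvK at h1
    omega

lemma pvEq2 (la lb : List Char) :
    pvLMax (PySem.List.pyRange (-(lb.length : Int) + 1) (la.length : Int) 1)
        (fun s => pvDV2 la lb s)
      = pvLMax (List.range (la.length + lb.length - 1))
          (fun d => pvCfull la lb la.length d) := by
  apply le_antisymm
  · refine pvLMax_le (pvLMax_nonneg _ _) (fun s hs => ?_)
    have hsb := (PySem.List.mem_pyRange_one).1 hs
    rw [pvCntTransfer la lb s hsb.1 hsb.2]
    refine le_pvLMax _ (List.mem_range.2 ?_)
    omega
  · refine pvLMax_le (pvLMax_nonneg _ _) (fun d hd => ?_)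
    have hd' := List.mem_range.1 hd
    set s : Int := (d : Int) - (lb.length : Int) + 1 with hsdef
    have hsS : s ∈ PySem.List.pyRange (-(lb.length : Int) + 1) (la.length : Int) 1 :=
      (PySem.List.mem_pyRange_one).2 ⟨by omega, by omega⟩
    have hde : (s + (lb.length : Int) - 1).toNat = d := by omega
    have := pvCntTransfer la lb s (by omega) (by omega)
    rw [hde] at this
    rw [← this]
    exact le_pvLMax _ hsS

-- ===== VERDICT (by name: the statement is the Claim_ definition above) =====
theorem consecutive_complement_runs_spec : Claim_equal_consecutive_complement_runs := by
  intro a b_rc _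
  show _ = _
  rw [consecutive_complement_runs, consecutive_complement_runs_alt]
  set la := (PySem.Str.upper a).toList
  set lb := (PySem.Str.upper b_rc).toList
  have hA : (PySem.List.pyRange (-(lb.length : Int) + 1) (la.length : Int) 1).foldl
      (pvAbody la lb) (0, 0) =
      (PySem.List.pyRange (-(lb.length : Int) + 1) (la.length : Int) 1).foldl
      (pvDiag la lb) (0, 0) := by
    refine pv_outer la lb _ (fun s hs => (PySem.List.mem_pyRange_one).1 hs) _ le_rfl
  rw [hA, pv_outer2]
  obtain ⟨B1, B2, _, _, _⟩ := pvOuter la lb la.length le_rfl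
  refine Prod.ext ?_ ?_
  · show pvLMax _ (fun s => pvDV1 la lb s) = _
    rw [pvEq1]
    exact B1.symm
  · show pvLMax _ (fun s => pvDV2 la lb s) = _
    rw [pvEq2]
    exact B2.symm
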